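-- pv_equiv track=rewrite | github.com/tkeaty/L1_HC | l1mb.py | initialize_pc_dict
-- ===== SOURCE A (Python) =====
-- def initialize_pc_dict(mb_dict):
--     pcs = {}
--
--     for c, mb in mb_dict.items():
--         for v in mb:
--             if c not in pcs:
--                 pcs[c] = [v]
--             elif v not in pcs[c]:
--                 pcs[c].append(v)
--
--             if v not in pcs:
--                 pcs[v] = [c]
--             elif c not in pcs[v]:
--                 pcs[v].append(c)
--
--     return pcs
-- ===== SOURCE B (Python) =====
-- def initialize_pc_dict(mb_dict):
--     pcs = {}
--     for c, mb in mb_dict.items():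
--         for v in mb:
--             pcs.setdefault(c, []).append(v)
--             pcs.setdefault(v, []).append(c)
--     return {k: list(dict.fromkeys(vs)) for k, vs in pcs.items()}
-- ===== Notes on version B (the rewrite author's own statement) =====
-- stated objective: faster
-- what changed: A's single interleaved loop with if/elif 'in'-list membership checks is replaced by a branch-free accumulate pass (setdefault+append for both directions) followed by a separate normalization pass deduplicating each adjacency list with dict.fromkeys.
import Mathlib
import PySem

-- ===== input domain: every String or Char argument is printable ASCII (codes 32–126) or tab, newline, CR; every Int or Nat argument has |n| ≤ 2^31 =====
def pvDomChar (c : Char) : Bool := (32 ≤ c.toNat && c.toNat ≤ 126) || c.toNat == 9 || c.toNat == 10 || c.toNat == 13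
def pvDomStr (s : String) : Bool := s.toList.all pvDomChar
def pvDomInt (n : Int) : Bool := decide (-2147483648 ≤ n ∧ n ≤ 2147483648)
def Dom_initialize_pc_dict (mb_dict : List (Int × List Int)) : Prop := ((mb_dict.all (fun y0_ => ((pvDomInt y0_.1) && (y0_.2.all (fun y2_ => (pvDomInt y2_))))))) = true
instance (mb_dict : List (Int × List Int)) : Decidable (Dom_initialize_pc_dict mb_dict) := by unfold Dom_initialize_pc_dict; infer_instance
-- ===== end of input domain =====

-- B replaces A's interleaved dedup-on-the-fly loop (if/elif membership scans) by a branch-free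
-- accumulate pass plus a separate dedup normalization pass; equivalence of the two is proved below.

-- ===== PORT A =====
-- one iteration of A's inner loop body: the if/elif chains for key c and value v
def pvStepA (c : Int) (pcs : PySem.Dict Int (List Int)) (v : Int) : PySem.Dict Int (List Int) :=
  let pcs :=
    if pcs.contains c = false then pcs.insert c [v]              -- if c not in pcs: pcs[c] = [v]
    else if (pcs.getD c []).contains v = false then pcs.modify c [] (· ++ [v])  -- elif v not in pcs[c]: pcs[c].append(v)
    else pcs
  if pcs.contains v = false then pcs.insert v [c]                -- if v not in pcs: pcs[v] = [c]
  else if (pcs.getD v []).contains c = false then pcs.modify v [] (· ++ [c])    -- elif c not in pcs[v]: pcs[v].append(c)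
  else pcs

def initialize_pc_dict (mb_dict : List (Int × List Int)) : List (Int × List Int) :=
  (mb_dict.foldl (fun pcs cm => cm.2.foldl (pvStepA cm.1) pcs) PySem.Dict.empty).items

-- ===== PORT B =====
-- one iteration of B's inner loop body: setdefault(...).append for both directions, no branches
def pvStepB (c : Int) (pcs : PySem.Dict Int (List Int)) (v : Int) : PySem.Dict Int (List Int) :=
  (pcs.modify c [] (· ++ [v])).modify v [] (· ++ [c])

def initialize_pc_dict_alt (mb_dict : List (Int × List Int)) : List (Int × List Int) :=
  let pcs := mb_dict.foldl (fun pcs cm => cm.2.foldl (pvStepB cm.1) pcs) PySem.Dict.empty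
  -- {k: list(dict.fromkeys(vs)) for k, vs in pcs.items()} — keys of pcs are already unique
  pcs.items.map (fun p => (p.1, (PySem.Set.ofList p.2 : List Int)))

-- ===== PRECONDITION & SPEC =====
def Spec_initialize_pc_dict (mb_dict : List (Int × List Int)) (out : List (Int × List Int)) : Prop := out = initialize_pc_dict_alt mb_dict
instance (mb_dict : List (Int × List Int)) (out : List (Int × List Int)) : Decidable (Spec_initialize_pc_dict mb_dict out) := by unfold Spec_initialize_pc_dict; infer_instance

-- ===== CLAIM (what is proved, stated in full; the proofs are below) =====
def Claim_equal_initialize_pc_dict : Prop := ∀ (mb_dict : List (Int × List Int)), Dom_initialize_pc_dict mb_dict → Spec_initialize_pc_dict mb_dict (initialize_pc_dict mb_dict)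

-- ===== LEMMAS AND PROOFS =====

-- normalization: deduplicate every value list (first occurrence kept)
def pvNorm (l : List (Int × List Int)) : List (Int × List Int) :=
  l.map (fun p => (p.1, (PySem.Set.ofList p.2 : List Int)))

def pvNd (d : PySem.Dict Int (List Int)) : PySem.Dict Int (List Int) :=
  PySem.Dict.mk (pvNorm d.items)

theorem pvNorm_find (l : List (Int × List Int)) (x : Int) :
    (pvNorm l).find? (fun p => p.1 == x)
      = (l.find? (fun p => p.1 == x)).map (fun p => (p.1, (PySem.Set.ofList p.2 : List Int))) := by
  induction l with
  | nil => rfl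
  | cons p t ih =>
    simp only [pvNorm, List.map_cons, List.find?_cons]
    by_cases h : (p.1 == x) = true
    · simp [h]
    · simp only [h]; simpa [pvNorm] using ih

theorem pvNd_get? (d : PySem.Dict Int (List Int)) (x : Int) :
    (pvNd d).get? x = (d.get? x).map (fun l => (PySem.Set.ofList l : List Int)) := by
  simp [pvNd, PySem.Dict.get?, pvNorm_find, Option.map_map]; rfl

theorem pvNd_contains (d : PySem.Dict Int (List Int)) (x : Int) :
    (pvNd d).contains x = d.contains x := by
  simp only [pvNd, PySem.Dict.contains, pvNorm, List.any_map]
  rfl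

theorem pvOfList_singleton (y : Int) : (PySem.Set.ofList [y] : List Int) = [y] := rfl

theorem pvOfList_append_mem (l : List Int) (y : Int) (hy : y ∈ l) :
    (PySem.Set.ofList (l ++ [y]) : List Int) = PySem.Set.ofList l := by
  rw [PySem.Set.ofList_append, PySem.Set.update_cons, PySem.Set.update_nil]
  have hc : (PySem.Set.ofList l).contains y = true := by
    show List.contains (PySem.Set.ofList l) y = true
    exact List.contains_iff_mem.mpr ((PySem.Set.mem_ofList l y).mpr hy)
  show PySem.Set.add (PySem.Set.ofList l) y = PySem.Set.ofList l
  unfold PySem.Set.add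
  rw [hc]
  simp

theorem pvOfList_append_not_mem (l : List Int) (y : Int) (hy : y ∉ l) :
    (PySem.Set.ofList (l ++ [y]) : List Int) = PySem.Set.ofList l ++ [y] := by
  rw [PySem.Set.ofList_append, PySem.Set.update_cons, PySem.Set.update_nil]
  have hc : (PySem.Set.ofList l).contains y = false := by
    show List.contains (PySem.Set.ofList l) y = false
    rcases Bool.eq_false_or_eq_true (List.contains (PySem.Set.ofList l) y) with h' | h'
    · exact absurd ((PySem.Set.mem_ofList l y).mp (List.contains_iff_mem.mp h')) hy
    · exact h'
  show PySem.Set.add (PySem.Set.ofList l) y = PySem.Set.ofList l ++ [y]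
  unfold PySem.Set.add
  rw [hc]
  simp

-- with Nodup keys, every entry whose key is x carries the value find? returns
theorem pv_find_uniq (x : Int) (w : List Int) (l : List (Int × List Int))
    (hnd : (l.map (fun p => p.1)).Nodup)
    (hf : l.find? (fun p => p.1 == x) = some (x, w)) :
    ∀ p ∈ l, p.1 = x → p.2 = w := by
  induction l with
  | nil => intro p hp; simp at hp
  | cons q t ih =>
    intro p hp hpx
    simp only [List.map_cons, List.nodup_cons] at hnd
    by_cases hq : (q.1 == x) = true
    · rw [List.find?_cons_of_pos (p := fun r : Int × List Int => r.1 == x) hq] at hf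
      have hqw : q = (x, w) := Option.some.inj hf
      rcases List.mem_cons.mp hp with hp | hp
      · rw [hp, hqw]
      · exfalso
        apply hnd.1
        rw [show q.1 = x by simpa using hq, ← hpx]
        exact List.mem_map.mpr ⟨p, hp, rfl⟩
    · rw [List.find?_cons_of_neg (p := fun r : Int × List Int => r.1 == x) hq] at hf
      rcases List.mem_cons.mp hp with hp | hp
      · exact absurd (hp ▸ hpx) (by simpa using hq)
      · exact ih hnd.2 hf p hp hpx

theorem pv_half (d : PySem.Dict Int (List Int)) (h : d.keys.Nodup) (x y : Int) :
    pvNd (d.modify x [] (· ++ [y]))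
      = (if (pvNd d).contains x = false then (pvNd d).insert x [y]
         else if ((pvNd d).getD x []).contains y = false then (pvNd d).modify x [] (· ++ [y])
         else pvNd d) := by
  rcases Bool.eq_false_or_eq_true (d.contains x) with hc | hc
  · -- x is a key with current list l
    obtain ⟨l, hl⟩ : ∃ l, d.get? x = some l := by
      have hs := PySem.Dict.contains_eq_isSome_get? d x
      rw [hc] at hs
      exact Option.isSome_iff_exists.mp hs.symm
    have hg : d.getD x [] = l := by rw [PySem.Dict.getD_eq_get?_getD, hl]; rfl
    have hnc : (pvNd d).contains x = true := by rw [pvNd_contains]; exact hc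
    have hng : (pvNd d).getD x [] = (PySem.Set.ofList l : List Int) := by
      rw [PySem.Dict.getD_eq_get?_getD, pvNd_get?, hl]; rfl
    have hfind : d.items.find? (fun p => p.1 == x) = some (x, l) := by
      obtain ⟨q, hq, hq2⟩ := Option.map_eq_some_iff.mp (show (d.items.find? (fun p => p.1 == x)).map (fun p => p.2) = some l from hl)
      have hqx : q.1 = x := by simpa using List.find?_some hq
      rw [hq]
      obtain ⟨q1, q2⟩ := q
      simp only at hqx hq2
      rw [hqx, hq2]
    rw [if_neg (by simp [hnc])]
    by_cases hy : y ∈ l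
    · -- y already recorded under x: A does nothing, B's append is erased by dedup
      have hyc : ((pvNd d).getD x []).contains y = true := by
        rw [hng]
        exact List.contains_iff_mem.mpr ((PySem.Set.mem_ofList l y).mpr hy)
      rw [if_neg (by rw [hyc]; simp)]
      apply PySem.Dict.ext
      rw [show d.modify x [] (· ++ [y]) = d.insert x (l ++ [y]) by simp [PySem.Dict.modify, hg]]
      rw [show (pvNd (d.insert x (l ++ [y]))).items = pvNorm (d.insert x (l ++ [y])).items from rfl]
      rw [PySem.Dict.items_insert_of_contains _ _ hc]
      show (List.map (fun p => if (p.1 == x) = true then (x, l ++ [y]) else p) d.items).map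
            (fun p => (p.1, (PySem.Set.ofList p.2 : List Int))) = pvNorm d.items
      rw [List.map_map]
      apply List.map_congr_left
      intro p hp
      by_cases hpx : (p.1 == x) = true
      · have hpx' : p.1 = x := by simpa using hpx
        have hpl : p.2 = l := pv_find_uniq x l d.items h hfind p hp hpx'
        simp [Function.comp, hpx', hpl, pvOfList_append_mem l y hy]
      · simp [Function.comp, hpx]
    · -- y new under x: both sides append y at the end of x's list
      have hyc : ((pvNd d).getD x []).contains y = false := by
        rw [hng]
        rcases Bool.eq_false_or_eq_true ((PySem.Set.ofList l : List Int).contains y) with h' | h'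
        · exact absurd ((PySem.Set.mem_ofList l y).mp (List.contains_iff_mem.mp h')) hy
        · exact h'
      rw [if_pos hyc]
      apply PySem.Dict.ext
      rw [show d.modify x [] (· ++ [y]) = d.insert x (l ++ [y]) by simp [PySem.Dict.modify, hg]]
      rw [show (pvNd d).modify x [] (· ++ [y]) = (pvNd d).insert x ((PySem.Set.ofList l : List Int) ++ [y]) by simp [PySem.Dict.modify, hng]]
      rw [show (pvNd (d.insert x (l ++ [y]))).items = pvNorm (d.insert x (l ++ [y])).items from rfl]
      rw [PySem.Dict.items_insert_of_contains _ _ hc,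
          PySem.Dict.items_insert_of_contains _ _ hnc]
      simp only [pvNd, pvNorm, List.map_map]
      apply List.map_congr_left
      intro p _
      by_cases hpx : (p.1 == x) = true
      · simp [Function.comp, hpx, pvOfList_append_not_mem l y hy]
      · simp [Function.comp, hpx]
  · -- x not yet a key: both sides append the fresh entry
    have hg : d.getD x [] = [] := PySem.Dict.getD_of_not_contains d [] hc
    have hnc : (pvNd d).contains x = false := by rw [pvNd_contains]; exact hc
    rw [if_pos hnc]
    apply PySem.Dict.ext
    rw [show d.modify x [] (· ++ [y]) = d.insert x [y] by simp [PySem.Dict.modify, hg]]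
    rw [show (pvNd (d.insert x [y])).items = pvNorm (d.insert x [y]).items from rfl]
    rw [PySem.Dict.items_insert_of_not_contains _ _ hc,
        PySem.Dict.items_insert_of_not_contains _ _ hnc]
    simp [pvNorm, pvOfList_singleton]
    rfl
theorem pv_step (d : PySem.Dict Int (List Int)) (h : d.keys.Nodup) (c v : Int) :
    pvNd (pvStepB c d v) = pvStepA c (pvNd d) v := by
  unfold pvStepB pvStepA
  rw [pv_half (d.modify c [] (· ++ [v])) (PySem.Dict.nodup_keys_insert _ _ _ h) v c,
      pv_half d h c v]

theorem pv_nodup_modify (d : PySem.Dict Int (List Int)) (h : d.keys.Nodup) (x : Int) (y : Int) :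
    (d.modify x [] (· ++ [y])).keys.Nodup := by
  exact PySem.Dict.nodup_keys_insert _ _ _ h

theorem pv_inner (c : Int) (mb : List Int) (d : PySem.Dict Int (List Int)) (h : d.keys.Nodup) :
    pvNd (mb.foldl (pvStepB c) d) = mb.foldl (pvStepA c) (pvNd d)
      ∧ (mb.foldl (pvStepB c) d).keys.Nodup := by
  induction mb generalizing d with
  | nil => exact ⟨rfl, h⟩
  | cons v t ih =>
    have h1 : (pvStepB c d v).keys.Nodup := by
      exact pv_nodup_modify _ (pv_nodup_modify _ h _ _) _ _
    have := ih (pvStepB c d v) h1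
    simp only [List.foldl_cons]
    exact ⟨by rw [this.1, pv_step d h], this.2⟩

theorem pv_outer (l : List (Int × List Int)) (d : PySem.Dict Int (List Int)) (h : d.keys.Nodup) :
    pvNd (l.foldl (fun pcs cm => cm.2.foldl (pvStepB cm.1) pcs) d)
      = l.foldl (fun pcs cm => cm.2.foldl (pvStepA cm.1) pcs) (pvNd d)
      ∧ (l.foldl (fun pcs cm => cm.2.foldl (pvStepB cm.1) pcs) d).keys.Nodup := by
  induction l generalizing d with
  | nil => exact ⟨rfl, h⟩
  | cons cm t ih =>
    have hi := pv_inner cm.1 cm.2 d h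
    have := ih _ hi.2
    simp only [List.foldl_cons]
    exact ⟨by rw [this.1, hi.1], this.2⟩

-- ===== VERDICT (by name: the statement is the Claim_ definition above) =====
theorem initialize_pc_dict_spec : Claim_equal_initialize_pc_dict := by
  intro mb_dict _
  unfold Spec_initialize_pc_dict initialize_pc_dict initialize_pc_dict_alt
  have h := (pv_outer mb_dict PySem.Dict.empty (by simp [PySem.Dict.keys, PySem.Dict.empty])).1
  have : pvNd PySem.Dict.empty = PySem.Dict.empty := rfl
  rw [this] at h
  rw [← h]
  rfl
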